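-- pv_equiv track=rewrite | github.com/SharhadBashar/weaviate_fastapi | weaviate_db.py | combine_alternatives
-- ===== SOURCE A (Python) =====
-- from typing import Dict, List
--
-- def combine_alternatives(dishes: List[Dict], max_alternatives: int) -> List[str]:
--     alternatives = []
--     count = 0
--     for dish in dishes:
--         if (count >= max_alternatives):
--             break
--         for key in ['specificBaseAlternatives', 'alternativesWithinSameCuisine', 'healthAlternatives',]:
--             if (key in dish and dish[key] and dish[key] != 'None'):
--                 alternatives.extend(dish[key].strip('[]').replace("'", '').split(', '))
--                 count += len(dish[key].strip('[]').replace("'", '').split(', '))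
--             if count >= max_alternatives:
--                 break
--     return list(set(alternatives[:max_alternatives]))
-- ===== SOURCE B (Python) =====
-- from typing import Dict, List
--
-- KEYS = ['specificBaseAlternatives', 'alternativesWithinSameCuisine', 'healthAlternatives']
--
-- def combine_alternatives(dishes: List[Dict], max_alternatives: int) -> List[str]:
--     all_alts = [alt
--                 for dish in dishes
--                 for key in KEYS
--                 if key in dish and dish[key] and dish[key] != 'None'
--                 for alt in dish[key].strip('[]').replace("'", '').split(', ')]
--     return list(set(all_alts[:max(max_alternatives, 0)]))
-- ===== Notes on version B (the rewrite author's own statement) =====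
-- stated objective: simpler
-- what changed: B drops A's count accumulator and two-level early-break loop: one nested comprehension flattens every alternative of every dish, then a single clamped slice applies the cap (correct because A's early exit only ever discards elements past the cap).
import Mathlib
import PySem

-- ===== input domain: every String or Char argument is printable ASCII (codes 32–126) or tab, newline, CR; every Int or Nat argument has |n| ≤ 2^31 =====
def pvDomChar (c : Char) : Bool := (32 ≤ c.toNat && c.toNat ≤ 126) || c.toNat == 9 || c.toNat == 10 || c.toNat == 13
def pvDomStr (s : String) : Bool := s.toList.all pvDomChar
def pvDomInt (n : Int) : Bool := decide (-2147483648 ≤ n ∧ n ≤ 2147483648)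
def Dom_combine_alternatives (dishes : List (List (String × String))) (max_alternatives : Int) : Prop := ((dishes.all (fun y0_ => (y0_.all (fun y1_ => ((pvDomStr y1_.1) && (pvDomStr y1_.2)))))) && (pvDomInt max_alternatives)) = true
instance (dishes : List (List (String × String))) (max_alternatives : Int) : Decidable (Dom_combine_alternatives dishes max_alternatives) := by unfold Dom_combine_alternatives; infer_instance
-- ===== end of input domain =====

-- ===== PORT A =====
-- B replaces A's count accumulator and two-level early-break loop by one flat
-- flatMap plus a clamped slice (objective: simpler); same value as a set.
-- shared literal: the three fixed keys A iterates over
def pvKeys : List String :=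
  ["specificBaseAlternatives", "alternativesWithinSameCuisine", "healthAlternatives"]

-- dish[key].strip('[]').replace("'", '').split(', ')  (sep ", " is nonempty, split? is some)
def pvParse (v : String) : List String :=
  (PySem.Str.split? (PySem.Str.replace (PySem.Str.stripChars v "[]") "'" "") ", ").getD []

-- inner 'for key in [...]' loop of A, state = (alternatives, count), early break
def pvKeyLoop (max_alternatives : Int) (dish : List (String × String)) :
    List String → List String × Int → List String × Int
  | [], st => st
  | key :: ks, (alternatives, count) =>
      let st :=
        match dish.lookup key with      -- 'key in dish' + 'dish[key]' (first match, as dict)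
        | some v =>
            if v ≠ "" ∧ v ≠ "None" then
              (alternatives ++ pvParse v, count + ((pvParse v).length : Int))
            else (alternatives, count)
        | none => (alternatives, count)
      if st.2 ≥ max_alternatives then st
      else pvKeyLoop max_alternatives dish ks st

-- outer 'for dish in dishes' loop of A with the 'if count >= max_alternatives: break'
def pvDishLoop (max_alternatives : Int) :
    List (List (String × String)) → List String × Int → List String × Int
  | [], st => st
  | dish :: ds, (alternatives, count) =>
      if count ≥ max_alternatives then (alternatives, count)
      else pvDishLoop max_alternatives ds
        (pvKeyLoop max_alternatives dish pvKeys (alternatives, count))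

def combine_alternatives (dishes : List (List (String × String))) (max_alternatives : Int) :
    List String :=
  PySem.Set.ofList
    (PySem.List.slice (pvDishLoop max_alternatives dishes ([], 0)).1 none (some max_alternatives))

-- ===== PORT B =====
-- the alternatives one (dish, key) pair contributes in B's comprehension
def pvStep (dish : List (String × String)) (key : String) : List String :=
  match dish.lookup key with
  | some v => if v ≠ "" ∧ v ≠ "None" then pvParse v else []
  | none => []

def combine_alternatives_alt (dishes : List (List (String × String))) (max_alternatives : Int) :
    List String :=
  PySem.Set.ofList
    (PySem.List.slice (dishes.flatMap (fun dish => pvKeys.flatMap (pvStep dish)))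
      none (some (max max_alternatives 0)))

-- ===== PRECONDITION & SPEC =====
def Spec_combine_alternatives (dishes : List (List (String × String))) (max_alternatives : Int) (out : List String) : Prop := out = combine_alternatives_alt dishes max_alternatives
instance (dishes : List (List (String × String))) (max_alternatives : Int) (out : List String) : Decidable (Spec_combine_alternatives dishes max_alternatives out) := by unfold Spec_combine_alternatives; infer_instance

-- ===== CLAIM (what is proved, stated in full; the proofs are below) =====
def Claim_equal_combine_alternatives : Prop := ∀ (dishes : List (List (String × String))) (max_alternatives : Int), Dom_combine_alternatives dishes max_alternatives → Spec_combine_alternatives dishes max_alternatives (combine_alternatives dishes max_alternatives)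

-- ===== LEMMAS AND PROOFS =====


-- A's update of (alternatives, count) for one key is: append pvStep, add its length
theorem pvStep_update (dish : List (String × String)) (key : String)
    (a : List String) (c : Int) :
    (match dish.lookup key with
     | some v =>
         if v ≠ "" ∧ v ≠ "None" then
           (a ++ pvParse v, c + ((pvParse v).length : Int))
         else (a, c)
     | none => (a, c))
    = (a ++ pvStep dish key, c + ((pvStep dish key).length : Int)) := by
  unfold pvStep
  cases dish.lookup key with
  | none => simp
  | some v =>
    simp only []
    split_ifs with h
    · rfl
    · simp

theorem pvKeyLoop_spec (m : Int) (dish : List (String × String)) :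
    ∀ (ks : List String) (a : List String),
    ∃ q, pvKeyLoop m dish ks (a, (a.length : Int)) = (a ++ q, ((a ++ q).length : Int)) ∧
      q <+: ks.flatMap (pvStep dish) ∧
      (q = ks.flatMap (pvStep dish) ∨ m ≤ ((a ++ q).length : Int)) := by
  intro ks
  induction ks with
  | nil => intro a; exact ⟨[], by simp [pvKeyLoop], by simp, Or.inl (by simp)⟩
  | cons key ks ih =>
    intro a
    have hup := pvStep_update dish key a ((a.length : Int))
    have hlen : (a.length : Int) + ((pvStep dish key).length : Int)
        = ((a ++ pvStep dish key).length : Int) := by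
      push_cast [List.length_append]; ring
    by_cases hbr : ((a ++ pvStep dish key).length : Int) ≥ m
    · refine ⟨pvStep dish key, ?_, ?_, Or.inr hbr⟩
      · simp only [pvKeyLoop, hup, hlen]
        rw [if_pos hbr]
      · simp [List.prefix_append]
    · obtain ⟨q', hq'eq, hq'pre, hq'disj⟩ := ih (a ++ pvStep dish key)
      refine ⟨pvStep dish key ++ q', ?_, ?_, ?_⟩
      · simp only [pvKeyLoop, hup, hlen]
        rw [if_neg hbr, hq'eq]
        simp [List.append_assoc]
      · obtain ⟨t, ht⟩ := hq'pre
        exact ⟨t, by simp [List.append_assoc, ht]⟩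
      · rcases hq'disj with h | h
        · exact Or.inl (by simp [h])
        · exact Or.inr (by simpa [List.append_assoc] using h)

theorem pvDishLoop_stop (m : Int) (ds : List (List (String × String)))
    (a : List String) (c : Int) (h : c ≥ m) :
    pvDishLoop m ds (a, c) = (a, c) := by
  cases ds with
  | nil => rfl
  | cons d ds => simp [pvDishLoop, h]

theorem pvDishLoop_spec (m : Int) :
    ∀ (ds : List (List (String × String))) (a : List String),
    ∃ q, pvDishLoop m ds (a, (a.length : Int)) = (a ++ q, ((a ++ q).length : Int)) ∧
      q <+: ds.flatMap (fun dish => pvKeys.flatMap (pvStep dish)) ∧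
      (q = ds.flatMap (fun dish => pvKeys.flatMap (pvStep dish))
        ∨ m ≤ ((a ++ q).length : Int)) := by
  intro ds
  induction ds with
  | nil => intro a; exact ⟨[], by simp [pvDishLoop], by simp, Or.inl (by simp)⟩
  | cons dish ds ih =>
    intro a
    by_cases h0 : (a.length : Int) ≥ m
    · refine ⟨[], ?_, by simp, Or.inr (by simpa using h0)⟩
      simp only [pvDishLoop, if_pos h0]; simp
    · obtain ⟨q1, h1eq, h1pre, h1disj⟩ := pvKeyLoop_spec m dish pvKeys a
      rcases h1disj with hfull | hbr
      · obtain ⟨q2, h2eq, h2pre, h2disj⟩ := ih (a ++ q1)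
        refine ⟨q1 ++ q2, ?_, ?_, ?_⟩
        · simp only [pvDishLoop, if_neg h0, h1eq, h2eq]
          simp [List.append_assoc]
        · obtain ⟨t, ht⟩ := h2pre
          exact ⟨t, by simp [List.flatMap_cons, hfull, List.append_assoc, ht]⟩
        · rcases h2disj with h | h
          · exact Or.inl (by simp [List.flatMap_cons, hfull, h])
          · exact Or.inr (by simpa [List.append_assoc] using h)
      · refine ⟨q1, ?_, ?_, Or.inr hbr⟩
        · simp only [pvDishLoop, if_neg h0, h1eq]
          exact pvDishLoop_stop m ds _ _ hbr
        · obtain ⟨t, ht⟩ := h1pre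
          exact ⟨t ++ ds.flatMap (fun dish => pvKeys.flatMap (pvStep dish)),
            by simp [List.flatMap_cons, ← ht, List.append_assoc]⟩

theorem pvSlice_eq (dishes : List (List (String × String))) (m : Int) :
    PySem.List.slice (pvDishLoop m dishes ([], 0)).1 none (some m)
      = PySem.List.slice (dishes.flatMap (fun dish => pvKeys.flatMap (pvStep dish)))
          none (some (max m 0)) := by
  obtain ⟨q, heq, hpre, hdisj⟩ := pvDishLoop_spec m dishes []
  have heq' : pvDishLoop m dishes ([], 0) = (q, (q.length : Int)) := by simpa using heq
  rw [heq']
  by_cases hm : 0 < m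
  · have hmax : max m 0 = m := by omega
    rw [hmax, PySem.List.slice_to _ (le_of_lt hm), PySem.List.slice_to _ (le_of_lt hm)]
    rcases hdisj with hfull | hlen
    · rw [hfull]
    · obtain ⟨t, ht⟩ := hpre
      have hn : m.toNat ≤ q.length := by simp only [List.nil_append] at hlen; omega
      rw [← ht, List.take_append_of_le_length hn]
  · have h0 : (0 : Int) ≥ m := by omega
    have : pvDishLoop m dishes ([], 0) = ([], 0) := pvDishLoop_stop m dishes [] 0 h0
    rw [heq'] at this
    have hq : q = [] := by simpa using congrArg Prod.fst this
    have hmax : max m 0 = 0 := by omega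
    subst hq
    rw [hmax, PySem.List.slice_to _ (le_refl 0)]
    apply List.eq_nil_iff_forall_not_mem.mpr
    intro x hx
    exact absurd (PySem.List.mem_of_mem_slice _ _ _ hx) (by simp)

-- ===== VERDICT (by name: the statement is the Claim_ definition above) =====
theorem combine_alternatives_spec : Claim_equal_combine_alternatives := by
  intro dishes m _dom
  unfold Spec_combine_alternatives combine_alternatives combine_alternatives_alt
  rw [pvSlice_eq]
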